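-- pv_equiv track=rewrite | github.com/RiannaXu/DynamicLip | extract_features/ht4_v3_ownpic.py | extract_segments_from_detection_array
-- ===== SOURCE A (Python) =====
-- def extract_segments_from_detection_array(points, detection_array):
--     segments = []
--     current_segment = []
--
--     for i, flag in enumerate(detection_array):
--         if flag == 1:
--             current_segment.append(points[i])
--         else:
--             if current_segment:
--                 segments.append(current_segment)
--                 current_segment = []
--
--     if current_segment:
--         segments.append(current_segment)
--
--     return segments
-- ===== SOURCE B (Python) =====
-- def extract_segments_from_detection_array(points, detection_array):
--     # Two-level scan: find each maximal run of flags equal to 1 and emit it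
--     # as one segment, instead of a flat pass with a current-segment accumulator.
--     segments = []
--     n = len(detection_array)
--     i = 0
--     while i < n:
--         if detection_array[i] != 1:
--             i += 1
--             continue
--         seg = []
--         j = i
--         while j < n and detection_array[j] == 1:
--             seg.append(points[j])
--             j += 1
--         segments.append(seg)
--         i = j
--     return segments
-- ===== Notes on version B (the rewrite author's own statement) =====
-- stated objective: alternative
-- what changed: Replaced the flat scan that threads a current-segment accumulator and flushes it on non-1 flags (and once after the loop) by a two-level scan that skips non-1 flags and, at each 1, consumes the whole maximal run of 1s at once, emitting it directly as a segment.
import Mathlib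
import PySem

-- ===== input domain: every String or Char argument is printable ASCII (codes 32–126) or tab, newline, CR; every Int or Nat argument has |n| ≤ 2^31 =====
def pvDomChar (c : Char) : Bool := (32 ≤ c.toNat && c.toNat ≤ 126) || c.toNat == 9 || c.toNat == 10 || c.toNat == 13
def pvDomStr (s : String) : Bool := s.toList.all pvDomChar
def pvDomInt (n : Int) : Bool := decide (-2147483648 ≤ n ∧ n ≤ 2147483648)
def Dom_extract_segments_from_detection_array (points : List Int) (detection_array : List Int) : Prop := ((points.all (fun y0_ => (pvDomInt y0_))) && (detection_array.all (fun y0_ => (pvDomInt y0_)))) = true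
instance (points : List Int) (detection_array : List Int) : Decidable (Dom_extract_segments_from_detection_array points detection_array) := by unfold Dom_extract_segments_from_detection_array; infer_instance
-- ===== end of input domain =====

-- B replaces A's flat scan with a current-segment accumulator by a two-level scan
-- that consumes each maximal run of 1-flags at once (objective: alternative).
-- Pre_ excludes the inputs where Python A raises IndexError (a 1-flag at an index
-- beyond the end of points); there the ports take a default 0.


-- ===== PORT A =====
-- A's loop over enumerate(detection_array), threading (segments, current_segment);
-- 'if current_segment:' is the isEmpty test; the trailing flush is the [] case.
-- points[i] is exact on Pre_ (index in range); where Python raises IndexError the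
-- port takes default 0 (those inputs are excluded by Pre_).
def aGo (points : List Int) : List (Int × Int) → List (List Int) → List Int → List (List Int)
  | [], segs, cur => if cur.isEmpty then segs else segs ++ [cur]
  | p :: rest, segs, cur =>
    if p.2 == 1 then aGo points rest segs (cur ++ [(PySem.List.pyGet? points p.1).getD 0])
    else if cur.isEmpty then aGo points rest segs cur
    else aGo points rest (segs ++ [cur]) []

def extract_segments_from_detection_array (points : List Int) (detection_array : List Int) : List (List Int) :=
  aGo points (PySem.List.enumerate detection_array) [] []

-- ===== PORT B =====
-- B's inner while: consume the maximal run of 1-flags, collecting points[j].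
def bTake (points : List Int) : List (Int × Int) → List Int × List (Int × Int)
  | [] => ([], [])
  | p :: rest =>
    if p.2 == 1 then
      ((PySem.List.pyGet? points p.1).getD 0 :: (bTake points rest).1, (bTake points rest).2)
    else ([], p :: rest)

theorem bTake_len (points : List Int) : ∀ l : List (Int × Int), (bTake points l).2.length ≤ l.length := by
  intro l
  induction l with
  | nil => simp [bTake]
  | cons p rest ih =>
    by_cases h : (p.2 == 1) = true
    · simp [bTake, h]; omega
    · simp [bTake, h]

-- B's outer while: skip a non-1 flag, or emit the maximal run starting here.
def bGo (points : List Int) : List (Int × Int) → List (List Int)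
  | [] => []
  | p :: rest =>
    if p.2 == 1 then
      ((PySem.List.pyGet? points p.1).getD 0 :: (bTake points rest).1) :: bGo points (bTake points rest).2
    else bGo points rest
termination_by l => l.length
decreasing_by
  · have h := bTake_len points rest; simp only [List.length_cons]; omega
  · simp

def extract_segments_from_detection_array_alt (points : List Int) (detection_array : List Int) : List (List Int) :=
  bGo points (PySem.List.enumerate detection_array)

-- ===== PRECONDITION & SPEC =====
-- Pre_ excludes exactly the inputs on which Python A raises IndexError:
-- some index carrying flag 1 lies beyond the end of points.
def Pre_extract_segments_from_detection_array (points : List Int) (detection_array : List Int) : Prop :=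
  ∀ i ∈ List.range detection_array.length, detection_array.getD i 0 = 1 → i < points.length
instance (points : List Int) (detection_array : List Int) : Decidable (Pre_extract_segments_from_detection_array points detection_array) := by unfold Pre_extract_segments_from_detection_array; infer_instance

def pvWitness_extract_segments_from_detection_array : List Int × List Int := ([10, 20, 30], [1, 0, 1])

def Spec_extract_segments_from_detection_array (points : List Int) (detection_array : List Int) (out : List (List Int)) : Prop := out = extract_segments_from_detection_array_alt points detection_array
instance (points : List Int) (detection_array : List Int) (out : List (List Int)) : Decidable (Spec_extract_segments_from_detection_array points detection_array out) := by unfold Spec_extract_segments_from_detection_array; infer_instance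

-- ===== CLAIM (what is proved, stated in full; the proofs are below) =====
def Claim_equal_extract_segments_from_detection_array : Prop := ∀ (points : List Int) (detection_array : List Int), Dom_extract_segments_from_detection_array points detection_array → Pre_extract_segments_from_detection_array points detection_array → Spec_extract_segments_from_detection_array points detection_array (extract_segments_from_detection_array points detection_array)

-- ===== LEMMAS AND PROOFS =====

-- Equation lemmas, proved once; the proofs below only ever rewrite with these.
theorem aGo_nil (points : List Int) (segs : List (List Int)) (cur : List Int) :
    aGo points [] segs cur = if cur.isEmpty then segs else segs ++ [cur] := rfl

theorem aGo_cons (points : List Int) (p : Int × Int) (rest : List (Int × Int)) (segs : List (List Int)) (cur : List Int) :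
    aGo points (p :: rest) segs cur =
      if p.2 == 1 then aGo points rest segs (cur ++ [(PySem.List.pyGet? points p.1).getD 0])
      else if cur.isEmpty then aGo points rest segs cur
      else aGo points rest (segs ++ [cur]) [] := rfl

theorem bTake_nil (points : List Int) : bTake points [] = ([], []) := rfl

theorem bTake_cons (points : List Int) (p : Int × Int) (rest : List (Int × Int)) :
    bTake points (p :: rest) =
      if p.2 == 1 then
        ((PySem.List.pyGet? points p.1).getD 0 :: (bTake points rest).1, (bTake points rest).2)
      else ([], p :: rest) := rfl

theorem bGo_nil (points : List Int) : bGo points [] = [] := by rw [bGo]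

theorem bGo_cons (points : List Int) (p : Int × Int) (rest : List (Int × Int)) :
    bGo points (p :: rest) =
      if p.2 == 1 then
        ((PySem.List.pyGet? points p.1).getD 0 :: (bTake points rest).1) :: bGo points (bTake points rest).2
      else bGo points rest := by rw [bGo]

theorem aGo_append (points : List Int) :
    ∀ (l : List (Int × Int)) (segs : List (List Int)) (cur : List Int),
      aGo points l segs cur = segs ++ aGo points l [] cur := by
  intro l
  induction l with
  | nil =>
    intro segs cur
    rw [aGo_nil, aGo_nil]
    cases hc : cur.isEmpty <;> simp
  | cons p rest ih =>
    intro segs cur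
    rw [aGo_cons, aGo_cons]
    by_cases h : (p.2 == 1) = true
    · rw [if_pos h, if_pos h, ih]
    · rw [if_neg h, if_neg h]
      cases hc : cur.isEmpty
      · simp only [Bool.false_eq_true, if_false]
        rw [ih (segs ++ [cur]), ih ([] ++ [cur])]
        simp
      · simp only [reduceIte]
        exact ih segs cur
-- Core correspondence: A's accumulator loop equals B's run-based scan;
-- a nonempty accumulator merges with the leading run of 1-flags.
theorem aGo_eq_bGo (points : List Int) :
    ∀ l : List (Int × Int),
      (aGo points l [] [] = bGo points l) ∧
      (∀ cur : List Int, cur ≠ [] →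
        aGo points l [] cur = (cur ++ (bTake points l).1) :: bGo points (bTake points l).2) := by
  intro l
  induction l with
  | nil =>
    refine ⟨by rw [aGo_nil, bGo_nil]; simp, ?_⟩
    intro cur hc
    rw [aGo_nil, bTake_nil, bGo_nil]
    simp [hc]
  | cons p rest ih =>
    obtain ⟨ih0, ih1⟩ := ih
    by_cases h : (p.2 == 1) = true
    · constructor
      · rw [aGo_cons, if_pos h, bGo_cons, if_pos h]
        rw [ih1 _ (by simp)]
        simp
      · intro cur hc
        rw [aGo_cons, if_pos h, bTake_cons, if_pos h]
        rw [ih1 _ (by simp [hc])]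
        simp
    · constructor
      · rw [aGo_cons, if_neg h, bGo_cons, if_neg h]
        simp only [List.isEmpty_nil, reduceIte]
        exact ih0
      · intro cur hc
        rw [aGo_cons, if_neg h, bTake_cons, if_neg h, bGo_cons, if_neg h]
        rw [if_neg (by simp [hc])]
        rw [aGo_append, ih0]
        simp

-- ===== VERDICT (by name: the statement is the Claim_ definition above) =====
theorem extract_segments_from_detection_array_spec : Claim_equal_extract_segments_from_detection_array := by
  intro points detection_array _ _
  unfold Spec_extract_segments_from_detection_array extract_segments_from_detection_array extract_segments_from_detection_array_alt
  exact (aGo_eq_bGo points (PySem.List.enumerate detection_array)).1
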